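-- pv_equiv track=rewrite | github.com/RauPro/Competitive-Programming | Bootcamp/2023-2024 ICPC, Asia Yokohama Regional Contest 2023/M.py | can_visited_all
-- ===== SOURCE A (Python) =====
-- def can_visited_all(i, j,n,m, dir, total, mx):
--     #dir
--     # i + 1 -> N
--     # i - i -> S
--     # j + 1 -> W
--     # j - 1 -> E
--     visited = set()
--     mirrors = set()
--     while 0 <= i < n  and 0 <= j < m:
--         if (i,j, dir) in visited and mx[i][j] != '.':
--             break
--         if mx[i][j] != '.' and (i,j) not in mirrors:
--             total -= 1
--         visited.add((i, j,dir))
--         if mx[i][j] != '.':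
--             mirrors.add((i, j))
--
--         if mx[i][j] == '/' and dir == 'N': # -> E
--             dir = 'E'
--             j-=1
--         elif mx[i][j] == '/' and dir == 'E': # -> N
--             dir = 'N'
--             i+=1
--         elif mx[i][j] == '/' and dir == 'W': # -> S
--             dir = 'S'
--             i-=1
--         elif mx[i][j] == '/' and dir == 'S': # -> W
--             dir = 'W'
--             j+=1
--         elif mx[i][j] == '\\' and dir == 'N': # -> W
--             dir = 'W'
--             j+=1
--         elif mx[i][j] == '\\' and dir == 'E': # -> S
--             dir = 'S'
--             i-=1
--         elif mx[i][j] == '\\' and dir == 'W': # -> N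
--             dir = 'N'
--             i+=1
--         elif mx[i][j] == '\\' and dir == 'S': # -> E
--             dir = 'E'
--             j-=1
--         elif mx[i][j] == '.' and dir == 'S':
--             i-=1
--         elif mx[i][j] == '.' and dir == 'N':
--             i+=1
--         elif mx[i][j] == '.' and dir == 'E':
--             j-=1
--         elif mx[i][j] == '.' and dir == 'W':
--             j+=1
--     return total == 0
-- ===== SOURCE B (Python) =====
-- def can_visited_all(i, j, n, m, dir, total, mx):
--     # Bounce-to-bounce simulation: four linear sweeps precompute, for every cell,
--     # the nearest non-'.' cell in each direction; the beam then jumps directly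
--     # from mirror to mirror with one table lookup per bounce, and the answer is
--     # total == number of distinct mirror cells hit.
--     if not (0 <= i < n and 0 <= j < m):
--         return total == 0
--
--     def col_sweep(rng):
--         # successor table along rows: rows processed in order rng, each new row
--         # placed in front of the previously computed ones
--         tab = [[None] * m]
--         for r in rng:
--             tab.insert(0, [r if mx[r][c] != '.' else tab[0][c] for c in range(m)])
--         return tab
--
--     def row_sweep(r, rng):
--         row = [None]
--         for c in rng:
--             row.insert(0, c if mx[r][c] != '.' else row[0])
--         return row
--
--     nN = col_sweep(range(n - 1, -1, -1))    # nN[r][c],   r in 0..n : least mirror row r' >= r in column c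
--     nS = col_sweep(range(n))[::-1]          # nS[r+1][c], r in -1..n-1 : greatest mirror row r' <= r in column c
--     nW = [row_sweep(r, range(m - 1, -1, -1)) for r in range(n)]   # nW[r][c],   c in 0..m
--     nE = [row_sweep(r, range(m))[::-1] for r in range(n)]         # nE[r][c+1], c in -1..m-1
--
--     REFL = {('/', 'N'): 'E', ('/', 'E'): 'N', ('/', 'W'): 'S', ('/', 'S'): 'W',
--             ('\\', 'N'): 'W', ('\\', 'E'): 'S', ('\\', 'W'): 'N', ('\\', 'S'): 'E'}
--     seen = set()
--     hit = set()
--     while True: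
--         if dir == 'N':
--             t = nN[i][j]
--             if t is None: break
--             i = t
--         elif dir == 'S':
--             t = nS[i + 1][j]
--             if t is None: break
--             i = t
--         elif dir == 'W':
--             t = nW[i][j]
--             if t is None: break
--             j = t
--         else:
--             t = nE[i][j + 1]
--             if t is None: break
--             j = t
--         if (i, j, dir) in seen:
--             break
--         seen.add((i, j, dir))
--         hit.add((i, j))
--         nd = REFL.get((mx[i][j], dir))
--         if nd is None:
--             break
--         dir = nd
--         if dir == 'N':
--             i += 1
--         elif dir == 'S':
--             i -= 1
--         elif dir == 'W':
--             j += 1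
--         else:
--             j -= 1
--     return total == len(hit)
-- ===== Notes on version B (the rewrite author's own statement) =====
-- stated objective: alternative
-- what changed: B precomputes, by four linear sweeps, nearest-mirror successor tables for the four directions and then jumps the beam mirror-to-mirror with one table lookup per bounce (keeping a seen-state set and a hit set of mirror cells), instead of A's cell-by-cell walk that steps through every empty cell, records it in a visited set and mutates total.
-- outside the precondition, e.g. on can_visited_all(0, 0, 1, 1, 'Q', 1, [['X']]): A returns True, B returns True; on can_visited_all(0, 0, 2, 1, 'S', 0, [['.']]): A returns True, B raises IndexError
import Mathlib
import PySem

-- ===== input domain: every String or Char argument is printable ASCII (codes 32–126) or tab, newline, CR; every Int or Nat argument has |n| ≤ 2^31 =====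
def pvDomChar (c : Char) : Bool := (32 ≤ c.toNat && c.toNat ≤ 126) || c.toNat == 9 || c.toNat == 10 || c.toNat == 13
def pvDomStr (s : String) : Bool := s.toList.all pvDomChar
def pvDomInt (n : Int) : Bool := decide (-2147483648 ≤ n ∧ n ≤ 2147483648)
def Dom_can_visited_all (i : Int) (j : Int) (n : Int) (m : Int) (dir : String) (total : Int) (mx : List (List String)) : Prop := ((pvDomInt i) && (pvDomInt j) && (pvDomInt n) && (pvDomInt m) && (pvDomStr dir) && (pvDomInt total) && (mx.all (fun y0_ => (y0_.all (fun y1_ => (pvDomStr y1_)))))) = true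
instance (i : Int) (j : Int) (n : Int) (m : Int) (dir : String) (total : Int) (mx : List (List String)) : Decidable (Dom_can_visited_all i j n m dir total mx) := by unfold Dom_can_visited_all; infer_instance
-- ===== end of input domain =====

-- B replaces A's cell-by-cell walk (which records every visited cell in a set) by four linear
-- sweeps that precompute nearest-mirror successor tables and a loop that jumps the beam
-- mirror-to-mirror with one table lookup per bounce (objective: alternative algorithm).

-- mx[i][j]; the default "" stands for Python's IndexError there (excluded by Pre_).
def pvCell (mx : List (List String)) (i j : Int) : String :=
  (PySem.List.pyGet? ((PySem.List.pyGet? mx i).getD []) j).getD ""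

-- ===== PORT A =====
-- A's if/elif chain deciding the next position and direction (same branches, same order).
def aMove (c : String) (dir : String) (i j : Int) : Int × Int × String :=
  if c = "/" ∧ dir = "N" then (i, j - 1, "E")
  else if c = "/" ∧ dir = "E" then (i + 1, j, "N")
  else if c = "/" ∧ dir = "W" then (i - 1, j, "S")
  else if c = "/" ∧ dir = "S" then (i, j + 1, "W")
  else if c = "\\" ∧ dir = "N" then (i, j + 1, "W")
  else if c = "\\" ∧ dir = "E" then (i - 1, j, "S")
  else if c = "\\" ∧ dir = "W" then (i + 1, j, "N")
  else if c = "\\" ∧ dir = "S" then (i, j - 1, "E")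
  else if c = "." ∧ dir = "S" then (i - 1, j, dir)
  else if c = "." ∧ dir = "N" then (i + 1, j, dir)
  else if c = "." ∧ dir = "E" then (i, j - 1, dir)
  else if c = "." ∧ dir = "W" then (i, j + 1, dir)
  else (i, j, dir)                                       -- no branch fired: stay in place

def aLoop (mx : List (List String)) (n m : Int) :
    Nat → Int → Int → String → Int → PySem.Set (Int × Int × String) → PySem.Set (Int × Int) → Bool
  | 0, _, _, _, total, _, _ => decide (total = 0)        -- fuel artifact, never reached on Pre_
  | f+1, i, j, dir, total, visited, mirrors =>
    if (0 ≤ i ∧ i < n) ∧ (0 ≤ j ∧ j < m) then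
      if (i, j, dir) ∈ visited ∧ pvCell mx i j ≠ "." then decide (total = 0)   -- break
      else
        let total' := if pvCell mx i j ≠ "." ∧ (i, j) ∉ mirrors then total - 1 else total
        let visited' := PySem.Set.add visited (i, j, dir)
        let mirrors' := if pvCell mx i j ≠ "." then PySem.Set.add mirrors (i, j) else mirrors
        aLoop mx n m f (aMove (pvCell mx i j) dir i j).1 (aMove (pvCell mx i j) dir i j).2.1
          (aMove (pvCell mx i j) dir i j).2.2 total' visited' mirrors'
    else decide (total = 0)

def can_visited_all (i : Int) (j : Int) (n : Int) (m : Int) (dir : String) (total : Int) (mx : List (List String)) : Bool :=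
  aLoop mx n m (8 * n.toNat * m.toNat + 2) i j dir total PySem.Set.empty PySem.Set.empty

-- ===== PORT B =====
-- one step of col_sweep: the new row is placed in front (python: tab.insert(0, …), tab[0])
def bColStep (mx : List (List String)) (m : Int) (tab : List (List (Option Int))) (r : Int) :
    List (List (Option Int)) :=
  ((PySem.List.pyRange 0 m 1).map (fun c =>
      if pvCell mx r c ≠ "." then some r else PySem.List.pyGetD (tab.headD []) c none)) :: tab

def bColSweep (mx : List (List String)) (m : Int) (rng : List Int) : List (List (Option Int)) :=
  rng.foldl (bColStep mx m) [List.replicate m.toNat none]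

-- one step of row_sweep: the new entry is placed in front (python: row.insert(0, …), row[0])
def bRowStep (mx : List (List String)) (r : Int) (row : List (Option Int)) (c : Int) :
    List (Option Int) :=
  (if pvCell mx r c ≠ "." then some c else row.headD none) :: row

def bRowSweep (mx : List (List String)) (r : Int) (rng : List Int) : List (Option Int) :=
  rng.foldl (bRowStep mx r) [none]

-- the four successor tables of Source B
def bTabN (mx : List (List String)) (n m : Int) : List (List (Option Int)) :=
  bColSweep mx m (PySem.List.pyRange (n - 1) (-1) (-1))
def bTabS (mx : List (List String)) (n m : Int) : List (List (Option Int)) :=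
  (bColSweep mx m (PySem.List.pyRange 0 n 1)).reverse
def bTabW (mx : List (List String)) (n m : Int) : List (List (Option Int)) :=
  (PySem.List.pyRange 0 n 1).map (fun r => bRowSweep mx r (PySem.List.pyRange (m - 1) (-1) (-1)))
def bTabE (mx : List (List String)) (n m : Int) : List (List (Option Int)) :=
  (PySem.List.pyRange 0 n 1).map (fun r => (bRowSweep mx r (PySem.List.pyRange 0 m 1)).reverse)

-- the if/elif chain picking the table lookup for the current direction
def bLook (mx : List (List String)) (n m : Int) (dir : String) (i j : Int) : Option Int :=
  if dir = "N" then PySem.List.pyGetD (PySem.List.pyGetD (bTabN mx n m) i []) j none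
  else if dir = "S" then PySem.List.pyGetD (PySem.List.pyGetD (bTabS mx n m) (i + 1) []) j none
  else if dir = "W" then PySem.List.pyGetD (PySem.List.pyGetD (bTabW mx n m) i []) j none
  else PySem.List.pyGetD (PySem.List.pyGetD (bTabE mx n m) i []) (j + 1) none

-- REFL.get((mx[i][j], dir))
def bRefl (c : String) (dir : String) : Option String :=
  if c = "/" then
    (if dir = "N" then some "E" else if dir = "E" then some "N"
     else if dir = "W" then some "S" else if dir = "S" then some "W" else none)
  else if c = "\\" then
    (if dir = "N" then some "W" else if dir = "E" then some "S"
     else if dir = "W" then some "N" else if dir = "S" then some "E" else none)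
  else none

-- the bounce loop; d (structural depth) and f (one unit per cell the beam crosses, like A's
-- loop) are fuel artifacts only, never exhausted on Pre_ inputs
def bLoop (mx : List (List String)) (n m total : Int) :
    Nat → Nat → Int → Int → String → PySem.Set (Int × Int × String) → PySem.Set (Int × Int) → Bool
  | 0, _, _, _, _, _, hit => decide (total = PySem.Set.len hit)
  | _+1, 0, _, _, _, _, hit => decide (total = PySem.Set.len hit)
  | d+1, f+1, i, j, dir, seen, hit =>
    match bLook mx n m dir i j with
    | none => decide (total = PySem.Set.len hit)         -- no mirror ahead: beam leaves the grid
    | some v =>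
      let i' := if dir = "N" ∨ dir = "S" then v else i
      let j' := if dir = "N" ∨ dir = "S" then j else v
      let k := (i' - i).natAbs + (j' - j).natAbs         -- fuel accounting only (cells crossed)
      if k ≤ f then
        if (i', j', dir) ∈ seen then decide (total = PySem.Set.len hit)   -- break: loop closed
        else
          let seen' := PySem.Set.add seen (i', j', dir)
          let hit' := PySem.Set.add hit (i', j')
          match bRefl (pvCell mx i' j') dir with
          | none => decide (total = PySem.Set.len hit')  -- non-mirror obstacle: beam stops
          | some dir' =>
            let p : Int × Int :=
              if dir' = "N" then (i' + 1, j')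
              else if dir' = "S" then (i' - 1, j')
              else if dir' = "W" then (i', j' + 1)
              else (i', j' - 1)
            bLoop mx n m total d (f - k) p.1 p.2 dir' seen' hit'
      else decide (total = PySem.Set.len hit)

def can_visited_all_alt (i : Int) (j : Int) (n : Int) (m : Int) (dir : String) (total : Int) (mx : List (List String)) : Bool :=
  if (0 ≤ i ∧ i < n) ∧ (0 ≤ j ∧ j < m) then
    bLoop mx n m total (8 * n.toNat * m.toNat + 2) (8 * n.toNat * m.toNat + 2) i j dir
      PySem.Set.empty PySem.Set.empty
  else decide (total = 0)

-- ===== PRECONDITION & SPEC =====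
-- Pre_ excludes inputs on which Python A raises IndexError (the stored grid does not cover the
-- n×m box that the beam moves in) or loops forever (a direction outside 'NSEW' on an empty cell);
-- conservatively it asks the whole first n rows to be m wide and the direction to be valid
-- whenever the start lies inside the box, even when the beam would exit before noticing.
def Pre_can_visited_all (i : Int) (j : Int) (n : Int) (m : Int) (dir : String) (total : Int) (mx : List (List String)) : Prop :=
  ((0 ≤ i ∧ i < n) ∧ (0 ≤ j ∧ j < m)) →
    ((dir = "N" ∨ dir = "S" ∨ dir = "E" ∨ dir = "W") ∧
     n.toNat ≤ mx.length ∧ ∀ row ∈ mx.take n.toNat, m.toNat ≤ row.length)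
instance (i : Int) (j : Int) (n : Int) (m : Int) (dir : String) (total : Int) (mx : List (List String)) : Decidable (Pre_can_visited_all i j n m dir total mx) := by unfold Pre_can_visited_all; infer_instance

def pvWitness_can_visited_all : Int × Int × Int × Int × String × Int × List (List String) :=
  (0, 0, 2, 2, "N", 1, [[".", "/"], ["\\", "."]])

def Spec_can_visited_all (i : Int) (j : Int) (n : Int) (m : Int) (dir : String) (total : Int) (mx : List (List String)) (out : Bool) : Prop := out = can_visited_all_alt i j n m dir total mx
instance (i : Int) (j : Int) (n : Int) (m : Int) (dir : String) (total : Int) (mx : List (List String)) (out : Bool) : Decidable (Spec_can_visited_all i j n m dir total mx out) := by unfold Spec_can_visited_all; infer_instance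

-- ===== CLAIM (what is proved, stated in full; the proofs are below) =====
def Claim_equal_can_visited_all : Prop := ∀ (i : Int) (j : Int) (n : Int) (m : Int) (dir : String) (total : Int) (mx : List (List String)), Dom_can_visited_all i j n m dir total mx → Pre_can_visited_all i j n m dir total mx → Spec_can_visited_all i j n m dir total mx (can_visited_all i j n m dir total mx)

-- ===== LEMMAS AND PROOFS =====

-- first index x ≤ t < b with cell t ≠ '.', the value the forward sweeps store
def firstIdx (cell : Int → String) (b x : Int) : Option Int :=
  if h : x < b then (if cell x ≠ "." then some x else firstIdx cell b (x + 1)) else none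
termination_by (b - x).toNat
decreasing_by omega

-- last index 0 ≤ t ≤ x with cell t ≠ '.', the value the backward sweeps store
def lastIdx (cell : Int → String) (x : Int) : Option Int :=
  if h : 0 ≤ x then (if cell x ≠ "." then some x else lastIdx cell (x - 1)) else none
termination_by (x + 1).toNat
decreasing_by omega

theorem firstIdx_none (cell : Int → String) (b : Int) :
    ∀ (k : Nat) (x : Int), firstIdx cell b x = none → x + k < b → cell (x + k) = "." := by
  intro k
  induction k with
  | zero =>
    intro x h hb
    rw [firstIdx, dif_pos (by omega : x < b)] at h
    by_cases hc : cell x = "."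
    · simpa using hc
    · rw [if_pos hc] at h; exact absurd h (by simp)
  | succ k ih =>
    intro x h hb
    have hx : x < b := by omega
    rw [firstIdx, dif_pos hx] at h
    by_cases hc : cell x = "."
    · rw [if_neg (by simp [hc])] at h
      have := ih (x + 1) h (by omega)
      rwa [show x + 1 + (k : Int) = x + ((k : Nat) + 1 : Nat) by push_cast; ring] at this
    · rw [if_pos hc] at h; exact absurd h (by simp)

theorem firstIdx_some (cell : Int → String) (b : Int) :
    ∀ (k : Nat) (x v : Int), (b - x).toNat ≤ k → firstIdx cell b x = some v →
      x ≤ v ∧ v < b ∧ cell v ≠ "." ∧ ∀ t, x ≤ t → t < v → cell t = "." := by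
  intro k
  induction k with
  | zero =>
    intro x v hk h
    rw [firstIdx, dif_neg (by omega : ¬ x < b)] at h
    exact absurd h (by simp)
  | succ k ih =>
    intro x v hk h
    by_cases hx : x < b
    · rw [firstIdx, dif_pos hx] at h
      by_cases hc : cell x = "."
      · rw [if_neg (by simp [hc])] at h
        obtain ⟨h1, h2, h3, h4⟩ := ih (x + 1) v (by omega) h
        exact ⟨by omega, h2, h3, fun t ht1 ht2 => by
          rcases eq_or_lt_of_le ht1 with he | hl
          · rwa [← he]
          · exact h4 t (by omega) ht2⟩
      · rw [if_pos hc] at h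
        have hv : v = x := by simpa using h.symm
        subst hv
        exact ⟨le_refl _, hx, hc, fun t ht1 ht2 => by omega⟩
    · rw [firstIdx, dif_neg hx] at h; exact absurd h (by simp)

theorem lastIdx_none (cell : Int → String) :
    ∀ (k : Nat) (x : Int), lastIdx cell x = none → 0 ≤ x - k → cell (x - k) = "." := by
  intro k
  induction k with
  | zero =>
    intro x h hb
    rw [lastIdx, dif_pos (by omega : (0:Int) ≤ x)] at h
    by_cases hc : cell x = "."
    · simpa using hc
    · rw [if_pos hc] at h; exact absurd h (by simp)
  | succ k ih =>
    intro x h hb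
    have hx : (0:Int) ≤ x := by omega
    rw [lastIdx, dif_pos hx] at h
    by_cases hc : cell x = "."
    · rw [if_neg (by simp [hc])] at h
      have := ih (x - 1) h (by omega)
      rwa [show x - 1 - (k : Int) = x - ((k : Nat) + 1 : Nat) by push_cast; ring] at this
    · rw [if_pos hc] at h; exact absurd h (by simp)

theorem lastIdx_some (cell : Int → String) :
    ∀ (k : Nat) (x v : Int), (x + 1).toNat ≤ k → lastIdx cell x = some v →
      0 ≤ v ∧ v ≤ x ∧ cell v ≠ "." ∧ ∀ t, v < t → t ≤ x → cell t = "." := by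
  intro k
  induction k with
  | zero =>
    intro x v hk h
    rw [lastIdx, dif_neg (by omega : ¬ (0:Int) ≤ x)] at h
    exact absurd h (by simp)
  | succ k ih =>
    intro x v hk h
    by_cases hx : (0:Int) ≤ x
    · rw [lastIdx, dif_pos hx] at h
      by_cases hc : cell x = "."
      · rw [if_neg (by simp [hc])] at h
        obtain ⟨h1, h2, h3, h4⟩ := ih (x - 1) v (by omega) h
        exact ⟨h1, by omega, h3, fun t ht1 ht2 => by
          rcases eq_or_lt_of_le ht2 with he | hl
          · rwa [he]
          · exact h4 t ht1 (by omega)⟩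
      · rw [if_pos hc] at h
        have hv : v = x := by simpa using h.symm
        subst hv
        exact ⟨hx, le_refl _, hc, fun t ht1 ht2 => by omega⟩
    · rw [lastIdx, dif_neg hx] at h; exact absurd h (by simp)

theorem firstIdx_step (cell : Int → String) (b x : Int) (h : x < b) :
    firstIdx cell b x = if cell x ≠ "." then some x else firstIdx cell b (x + 1) := by
  rw [firstIdx, dif_pos h]

theorem lastIdx_step (cell : Int → String) (x : Int) (h : (0:Int) ≤ x) :
    lastIdx cell x = if cell x ≠ "." then some x else lastIdx cell (x - 1) := by
  rw [lastIdx, dif_pos h]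

theorem firstIdx_top (cell : Int → String) (b : Int) : firstIdx cell b b = none := by
  rw [firstIdx, dif_neg (by omega)]

theorem lastIdx_bot (cell : Int → String) : lastIdx cell (-1) = none := by
  rw [lastIdx, dif_neg (by omega)]

-- the forward col-sweep computes firstIdx row by row
theorem colSweep_forward_aux (mx : List (List String)) (m n : Int) :
    ∀ (k : Nat), (k : Int) ≤ n →
      (PySem.List.pyRange ((k : Int) - 1) (-1) (-1)).foldl (bColStep mx m)
        ((PySem.List.pyRange (k : Int) (n + 1)).map
          (fun r => (PySem.List.pyRange 0 m).map (fun c => firstIdx (fun t => pvCell mx t c) n r)))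
      = (PySem.List.pyRange 0 (n + 1)).map
          (fun r => (PySem.List.pyRange 0 m).map (fun c => firstIdx (fun t => pvCell mx t c) n r)) := by
  intro k
  induction k with
  | zero =>
    intro _
    rw [show ((0 : Nat) : Int) - 1 = -1 by norm_num,
        PySem.List.pyRange_neg_one_eq_nil (by omega), List.foldl_nil]
    norm_num
  | succ k ih =>
    intro hk
    rw [show ((k + 1 : Nat) : Int) - 1 = (k : Int) by push_cast; ring,
        PySem.List.pyRange_neg_one_cons (by omega : (-1 : Int) < (k : Int)), List.foldl_cons]
    have hstep : bColStep mx m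
        ((PySem.List.pyRange ((k + 1 : Nat) : Int) (n + 1)).map
          (fun r => (PySem.List.pyRange 0 m).map (fun c => firstIdx (fun t => pvCell mx t c) n r))) (k : Int)
        = (PySem.List.pyRange (k : Int) (n + 1)).map
          (fun r => (PySem.List.pyRange 0 m).map (fun c => firstIdx (fun t => pvCell mx t c) n r)) := by
      rw [bColStep]
      conv_rhs => rw [PySem.List.pyRange_one_cons (by omega : (k : Int) < n + 1), List.map_cons]
      congr 1
      rw [show (((PySem.List.pyRange ((k + 1 : Nat) : Int) (n + 1)).map
            (fun r => (PySem.List.pyRange 0 m).map (fun c => firstIdx (fun t => pvCell mx t c) n r))).headD [])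
          = (PySem.List.pyRange 0 m).map (fun c => firstIdx (fun t => pvCell mx t c) n ((k + 1 : Nat) : Int)) by
        rw [PySem.List.pyRange_one_cons (by push_cast; omega : ((k + 1 : Nat) : Int) < n + 1)]; rfl]
      apply List.map_congr_left
      intro c hc
      obtain ⟨hc0, hcm⟩ := PySem.List.mem_pyRange_one.mp hc
      rw [PySem.List.pyGetD_map_pyRange_of_nonneg _ m c none hc0 hcm]
      rw [show ((k + 1 : Nat) : Int) = (k : Int) + 1 by push_cast; ring]
      exact (firstIdx_step (fun t => pvCell mx t c) n (k : Int) (by omega : (k : Int) < n)).symm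
    rw [hstep]
    exact ih (by omega)

theorem noneRow_eq_firstIdx_row (mx : List (List String)) (n m : Int) :
    (PySem.List.pyRange 0 m).map (fun c => firstIdx (fun t => pvCell mx t c) n n)
      = List.replicate m.toNat (none : Option Int) := by
  rw [List.map_congr_left (fun c _ => firstIdx_top (fun t => pvCell mx t c) n)]
  rw [List.map_const', PySem.List.length_pyRange_one]
  norm_num

theorem noneRow_eq_lastIdx_row (mx : List (List String)) (m : Int) :
    (PySem.List.pyRange 0 m).map (fun c => lastIdx (fun t => pvCell mx t c) (-1))
      = List.replicate m.toNat (none : Option Int) := by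
  rw [List.map_congr_left (fun c _ => lastIdx_bot (fun t => pvCell mx t c))]
  rw [List.map_const', PySem.List.length_pyRange_one]
  norm_num

theorem bTabN_eq (mx : List (List String)) (n m : Int) (hn : 0 ≤ n) :
    bTabN mx n m = (PySem.List.pyRange 0 (n + 1)).map
      (fun r => (PySem.List.pyRange 0 m).map (fun c => firstIdx (fun t => pvCell mx t c) n r)) := by
  have hcast : ((n.toNat : Nat) : Int) = n := Int.toNat_of_nonneg hn
  have hinit : [List.replicate m.toNat (none : Option Int)]
      = (PySem.List.pyRange ((n.toNat : Nat) : Int) (n + 1)).map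
          (fun r => (PySem.List.pyRange 0 m).map (fun c => firstIdx (fun t => pvCell mx t c) n r)) := by
    rw [hcast, show n + 1 = n + 1 from rfl, PySem.List.pyRange_one_singleton, List.map_singleton,
        noneRow_eq_firstIdx_row]
  unfold bTabN bColSweep
  rw [show n - 1 = ((n.toNat : Nat) : Int) - 1 by rw [hcast], hinit]
  exact colSweep_forward_aux mx m n n.toNat (by omega)

theorem colSweep_backward_aux (mx : List (List String)) (m n : Int) :
    ∀ (k : Nat), (k : Int) ≤ n →
      (PySem.List.pyRange 0 (k : Int)).foldl (bColStep mx m) [List.replicate m.toNat none]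
      = ((PySem.List.pyRange (-1) (k : Int)).map
          (fun r => (PySem.List.pyRange 0 m).map (fun c => lastIdx (fun t => pvCell mx t c) r))).reverse := by
  intro k
  induction k with
  | zero =>
    intro _
    rw [show ((0 : Nat) : Int) = 0 by norm_num, PySem.List.pyRange_one_eq_nil (by omega), List.foldl_nil]
    rw [show PySem.List.pyRange (-1) (0 : Int) = [(-1 : Int)] by
      rw [show (0 : Int) = -1 + 1 by ring, PySem.List.pyRange_one_singleton]]
    rw [List.map_singleton, noneRow_eq_lastIdx_row, List.reverse_singleton]
  | succ k ih =>
    intro hk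
    rw [show ((k + 1 : Nat) : Int) = (k : Int) + 1 by push_cast; ring,
        PySem.List.pyRange_one_succ_right (by omega : (0:Int) ≤ (k : Int)), List.foldl_append,
        List.foldl_cons, List.foldl_nil, ih (by omega)]
    have hne : PySem.List.pyRange (-1) (k : Int)
        = PySem.List.pyRange (-1) ((k : Int) - 1) ++ [(k : Int) - 1] := by
      conv_lhs => rw [show (k : Int) = ((k : Int) - 1) + 1 by ring]
      exact PySem.List.pyRange_one_succ_right (by omega)
    have hhead : (((PySem.List.pyRange (-1) (k : Int)).map
          (fun r => (PySem.List.pyRange 0 m).map (fun c => lastIdx (fun t => pvCell mx t c) r))).reverse).headD []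
        = (PySem.List.pyRange 0 m).map (fun c => lastIdx (fun t => pvCell mx t c) ((k : Int) - 1)) := by
      rw [hne, List.map_append, List.map_singleton, List.reverse_append, List.reverse_singleton]
      rfl
    rw [bColStep, hhead]
    conv_rhs => rw [PySem.List.pyRange_one_succ_right (by omega : (-1:Int) ≤ (k : Int)),
      List.map_append, List.map_singleton, List.reverse_append, List.reverse_singleton]
    rw [List.singleton_append]
    congr 1
    apply List.map_congr_left
    intro c hc
    obtain ⟨hc0, hcm⟩ := PySem.List.mem_pyRange_one.mp hc
    rw [PySem.List.pyGetD_map_pyRange_of_nonneg _ m c none hc0 hcm]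
    exact (lastIdx_step (fun t => pvCell mx t c) (k : Int) (by omega)).symm

theorem bTabS_eq (mx : List (List String)) (n m : Int) (hn : 0 ≤ n) :
    bTabS mx n m = (PySem.List.pyRange (-1) n).map
      (fun r => (PySem.List.pyRange 0 m).map (fun c => lastIdx (fun t => pvCell mx t c) r)) := by
  have hcast : ((n.toNat : Nat) : Int) = n := Int.toNat_of_nonneg hn
  unfold bTabS bColSweep
  rw [show (0 : Int) = (0 : Int) from rfl, show n = ((n.toNat : Nat) : Int) by rw [hcast]]
  rw [colSweep_backward_aux mx m n n.toNat (by omega), List.reverse_reverse, hcast]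

theorem rowSweep_forward_aux (mx : List (List String)) (r m : Int) :
    ∀ (k : Nat), (k : Int) ≤ m →
      (PySem.List.pyRange ((k : Int) - 1) (-1) (-1)).foldl (bRowStep mx r)
        ((PySem.List.pyRange (k : Int) (m + 1)).map (fun c => firstIdx (fun t => pvCell mx r t) m c))
      = (PySem.List.pyRange 0 (m + 1)).map (fun c => firstIdx (fun t => pvCell mx r t) m c) := by
  intro k
  induction k with
  | zero =>
    intro _
    rw [show ((0 : Nat) : Int) - 1 = -1 by norm_num,
        PySem.List.pyRange_neg_one_eq_nil (by omega), List.foldl_nil]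
    norm_num
  | succ k ih =>
    intro hk
    rw [show ((k + 1 : Nat) : Int) - 1 = (k : Int) by push_cast; ring,
        PySem.List.pyRange_neg_one_cons (by omega : (-1 : Int) < (k : Int)), List.foldl_cons]
    have hstep : bRowStep mx r
        ((PySem.List.pyRange ((k + 1 : Nat) : Int) (m + 1)).map (fun c => firstIdx (fun t => pvCell mx r t) m c)) (k : Int)
        = (PySem.List.pyRange (k : Int) (m + 1)).map (fun c => firstIdx (fun t => pvCell mx r t) m c) := by
      rw [bRowStep]
      conv_rhs => rw [PySem.List.pyRange_one_cons (by omega : (k : Int) < m + 1), List.map_cons]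
      congr 1
      rw [show (((PySem.List.pyRange ((k + 1 : Nat) : Int) (m + 1)).map
            (fun c => firstIdx (fun t => pvCell mx r t) m c)).headD none)
          = firstIdx (fun t => pvCell mx r t) m ((k + 1 : Nat) : Int) by
        rw [PySem.List.pyRange_one_cons (by push_cast; omega : ((k + 1 : Nat) : Int) < m + 1)]; rfl]
      rw [show ((k + 1 : Nat) : Int) = (k : Int) + 1 by push_cast; ring]
      exact (firstIdx_step (fun t => pvCell mx r t) m (k : Int) (by omega : (k : Int) < m)).symm
    rw [hstep]
    exact ih (by omega)

theorem bRowW_eq (mx : List (List String)) (r m : Int) (hm : 0 ≤ m) :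
    bRowSweep mx r (PySem.List.pyRange (m - 1) (-1) (-1))
      = (PySem.List.pyRange 0 (m + 1)).map (fun c => firstIdx (fun t => pvCell mx r t) m c) := by
  have hcast : ((m.toNat : Nat) : Int) = m := Int.toNat_of_nonneg hm
  have hinit : [(none : Option Int)]
      = (PySem.List.pyRange ((m.toNat : Nat) : Int) (m + 1)).map (fun c => firstIdx (fun t => pvCell mx r t) m c) := by
    rw [hcast, PySem.List.pyRange_one_singleton, List.map_singleton, firstIdx_top]
  unfold bRowSweep
  rw [show m - 1 = ((m.toNat : Nat) : Int) - 1 by rw [hcast], hinit]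
  exact rowSweep_forward_aux mx r m m.toNat (by omega)

theorem rowSweep_backward_aux (mx : List (List String)) (r m : Int) :
    ∀ (k : Nat), (k : Int) ≤ m →
      (PySem.List.pyRange 0 (k : Int)).foldl (bRowStep mx r) [none]
      = ((PySem.List.pyRange (-1) (k : Int)).map (fun c => lastIdx (fun t => pvCell mx r t) c)).reverse := by
  intro k
  induction k with
  | zero =>
    intro _
    rw [show ((0 : Nat) : Int) = 0 by norm_num, PySem.List.pyRange_one_eq_nil (by omega), List.foldl_nil]
    rw [show PySem.List.pyRange (-1) (0 : Int) = [(-1 : Int)] by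
      rw [show (0 : Int) = -1 + 1 by ring, PySem.List.pyRange_one_singleton]]
    rw [List.map_singleton, lastIdx_bot, List.reverse_singleton]
  | succ k ih =>
    intro hk
    rw [show ((k + 1 : Nat) : Int) = (k : Int) + 1 by push_cast; ring,
        PySem.List.pyRange_one_succ_right (by omega : (0:Int) ≤ (k : Int)), List.foldl_append,
        List.foldl_cons, List.foldl_nil, ih (by omega)]
    have hne : PySem.List.pyRange (-1) (k : Int)
        = PySem.List.pyRange (-1) ((k : Int) - 1) ++ [(k : Int) - 1] := by
      conv_lhs => rw [show (k : Int) = ((k : Int) - 1) + 1 by ring]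
      exact PySem.List.pyRange_one_succ_right (by omega)
    have hhead : (((PySem.List.pyRange (-1) (k : Int)).map
          (fun c => lastIdx (fun t => pvCell mx r t) c)).reverse).headD none
        = lastIdx (fun t => pvCell mx r t) ((k : Int) - 1) := by
      rw [hne, List.map_append, List.map_singleton, List.reverse_append, List.reverse_singleton]
      rfl
    rw [bRowStep, hhead]
    conv_rhs => rw [PySem.List.pyRange_one_succ_right (by omega : (-1:Int) ≤ (k : Int)),
      List.map_append, List.map_singleton, List.reverse_append, List.reverse_singleton]
    rw [List.singleton_append]
    congr 1
    exact (lastIdx_step (fun t => pvCell mx r t) (k : Int) (by omega)).symm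

theorem bRowE_eq (mx : List (List String)) (r m : Int) (hm : 0 ≤ m) :
    (bRowSweep mx r (PySem.List.pyRange 0 m)).reverse
      = (PySem.List.pyRange (-1) m).map (fun c => lastIdx (fun t => pvCell mx r t) c) := by
  have hcast : ((m.toNat : Nat) : Int) = m := Int.toNat_of_nonneg hm
  unfold bRowSweep
  rw [show m = ((m.toNat : Nat) : Int) by rw [hcast]]
  rw [rowSweep_backward_aux mx r m m.toNat (by omega), List.reverse_reverse, hcast]

theorem look_N (mx : List (List String)) (n m i j : Int) (hn : 0 ≤ n)
    (hi0 : 0 ≤ i) (hin : i ≤ n) (hj0 : 0 ≤ j) (hjm : j < m) :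
    bLook mx n m "N" i j = firstIdx (fun t => pvCell mx t j) n i := by
  rw [bLook, if_pos rfl, bTabN_eq mx n m hn,
      PySem.List.pyGetD_map_pyRange_of_nonneg _ (n + 1) i [] hi0 (by omega),
      PySem.List.pyGetD_map_pyRange_of_nonneg _ m j none hj0 hjm]

theorem look_S (mx : List (List String)) (n m i j : Int) (hn : 0 ≤ n)
    (hi0 : -1 ≤ i) (hin : i < n) (hj0 : 0 ≤ j) (hjm : j < m) :
    bLook mx n m "S" i j = lastIdx (fun t => pvCell mx t j) i := by
  rw [bLook, if_neg (by simp), if_pos rfl, bTabS_eq mx n m hn]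
  have hk : ((i + 1).toNat : Int) = i + 1 := Int.toNat_of_nonneg (by omega)
  rw [show i + 1 = (((i + 1).toNat : Nat) : Int) by rw [hk],
      PySem.List.pyGetD_map_pyRange_one _ (-1) n ((i + 1).toNat) [] (by omega),
      show (-1 : Int) + (((i + 1).toNat : Nat) : Int) = i by omega,
      PySem.List.pyGetD_map_pyRange_of_nonneg _ m j none hj0 hjm]

theorem look_W (mx : List (List String)) (n m i j : Int) (hm : 0 ≤ m)
    (hi0 : 0 ≤ i) (hin : i < n) (hj0 : 0 ≤ j) (hjm : j ≤ m) :
    bLook mx n m "W" i j = firstIdx (fun t => pvCell mx i t) m j := by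
  rw [bLook, if_neg (by simp), if_neg (by simp), if_pos rfl, bTabW,
      PySem.List.pyGetD_map_pyRange_of_nonneg _ n i [] hi0 hin,
      bRowW_eq mx i m hm,
      PySem.List.pyGetD_map_pyRange_of_nonneg _ (m + 1) j none hj0 (by omega)]

theorem look_E (mx : List (List String)) (n m i j : Int) (hm : 0 ≤ m)
    (hi0 : 0 ≤ i) (hin : i < n) (hj0 : -1 ≤ j) (hjm : j < m) :
    bLook mx n m "E" i j = lastIdx (fun t => pvCell mx i t) j := by
  rw [bLook, if_neg (by simp), if_neg (by simp), if_neg (by simp), bTabE,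
      PySem.List.pyGetD_map_pyRange_of_nonneg _ n i [] hi0 hin,
      bRowE_eq mx i m hm]
  have hk : ((j + 1).toNat : Int) = j + 1 := Int.toNat_of_nonneg (by omega)
  rw [show j + 1 = (((j + 1).toNat : Nat) : Int) by rw [hk],
      PySem.List.pyGetD_map_pyRange_one _ (-1) m ((j + 1).toNat) none (by omega),
      show (-1 : Int) + (((j + 1).toNat : Nat) : Int) = j by omega]

-- ----- A-side loop lemmas -----

theorem aLoop_oob (mx : List (List String)) (n m : Int) (f : Nat) (i j : Int) (dir : String)
    (total : Int) (visited : PySem.Set (Int × Int × String)) (mirrors : PySem.Set (Int × Int))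
    (h : ¬ ((0 ≤ i ∧ i < n) ∧ (0 ≤ j ∧ j < m))) :
    aLoop mx n m f i j dir total visited mirrors = decide (total = 0) := by
  cases f with
  | zero => rfl
  | succ g => rw [aLoop, if_neg h]

-- at a non-empty cell whose state is already in visited, A breaks (or runs out of fuel with the
-- same answer): the result is total == 0 for every fuel
theorem aLoop_break (mx : List (List String)) (n m : Int) (f : Nat) (i j : Int) (dir : String)
    (total : Int) (visited : PySem.Set (Int × Int × String)) (mirrors : PySem.Set (Int × Int))
    (hmem : (i, j, dir) ∈ visited) (hc : pvCell mx i j ≠ ".") :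
    aLoop mx n m f i j dir total visited mirrors = decide (total = 0) := by
  cases f with
  | zero => rfl
  | succ g =>
    rw [aLoop]
    split
    · rw [if_pos ⟨hmem, hc⟩]
    · rfl

-- straight flight across a grid full of '.' in this direction: A exits and keeps total
theorem aLoop_exit (mx : List (List String)) (n m : Int) (dir : String) (d1 d2 : Int)
    (hmv : ∀ a b : Int, aMove "." dir a b = (a + d1, b + d2, dir)) :
    ∀ (f : Nat) (i j tot : Int) (visited : PySem.Set (Int × Int × String)) (mirrors : PySem.Set (Int × Int)),
      (∀ t : Nat, ((0 ≤ i + t * d1 ∧ i + t * d1 < n) ∧ (0 ≤ j + t * d2 ∧ j + t * d2 < m)) →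
        pvCell mx (i + t * d1) (j + t * d2) = ".") →
      aLoop mx n m f i j dir tot visited mirrors = decide (tot = 0) := by
  intro f
  induction f with
  | zero => intro i j tot visited mirrors _; rfl
  | succ g ih =>
    intro i j tot visited mirrors hdots
    rw [aLoop]
    split
    · rename_i hb
      have hc : pvCell mx i j = "." := by
        have := hdots 0 (by push_cast; simpa using hb)
        simpa using this
      rw [if_neg (by simp [hc])]
      simp only [hc, hmv]
      rw [if_neg (by simp), if_neg (by simp)]
      apply ih
      intro t ht
      have h2 := hdots (t + 1)
      rw [show i + (((t + 1 : Nat)) : Int) * d1 = i + d1 + (t : Int) * d1 by push_cast; ring,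
          show j + (((t + 1 : Nat)) : Int) * d2 = j + d2 + (t : Int) * d2 by push_cast; ring] at h2
      exact h2 ht
    · rfl

-- flight across k '.' cells: A either exhausts its fuel (answer total == 0) or arrives at the
-- k-th cell with only '.'-states added to visited
theorem aLoop_run (mx : List (List String)) (n m : Int) (dir : String) (d1 d2 : Int)
    (hmv : ∀ a b : Int, aMove "." dir a b = (a + d1, b + d2, dir)) :
    ∀ (k : Nat) (f : Nat) (i j tot : Int) (visited : PySem.Set (Int × Int × String)) (mirrors : PySem.Set (Int × Int)),
      (∀ t : Nat, t < k → ((0 ≤ i + t * d1 ∧ i + t * d1 < n) ∧ (0 ≤ j + t * d2 ∧ j + t * d2 < m)) ∧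
        pvCell mx (i + t * d1) (j + t * d2) = ".") →
      (f ≤ k → aLoop mx n m f i j dir tot visited mirrors = decide (tot = 0)) ∧
      (k < f → ∃ visited', (∀ e ∈ visited, e ∈ visited') ∧
        (∀ e ∈ visited', e ∈ visited ∨ pvCell mx e.1 e.2.1 = ".") ∧
        aLoop mx n m f i j dir tot visited mirrors
          = aLoop mx n m (f - k) (i + k * d1) (j + k * d2) dir tot visited' mirrors) := by
  intro k
  induction k with
  | zero =>
    intro f i j tot visited mirrors _
    constructor
    · intro hf
      have : f = 0 := by omega
      subst this; rfl
    · intro _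
      exact ⟨visited, fun e he => he, fun e he => Or.inl he, by norm_num⟩
  | succ k ih =>
    intro f i j tot visited mirrors hdots
    have h0 := hdots 0 (by omega)
    have hb : (0 ≤ i ∧ i < n) ∧ (0 ≤ j ∧ j < m) := by
      have := h0.1; push_cast at this; simpa using this
    have hc : pvCell mx i j = "." := by have := h0.2; simpa using this
    have hshift : ∀ t : Nat, t < k →
        ((0 ≤ (i + d1) + t * d1 ∧ (i + d1) + t * d1 < n) ∧
         (0 ≤ (j + d2) + t * d2 ∧ (j + d2) + t * d2 < m)) ∧
        pvCell mx ((i + d1) + t * d1) ((j + d2) + t * d2) = "." := by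
      intro t ht
      have h2 := hdots (t + 1) (by omega)
      rw [show i + (((t + 1 : Nat)) : Int) * d1 = i + d1 + (t : Int) * d1 by push_cast; ring,
          show j + (((t + 1 : Nat)) : Int) * d2 = j + d2 + (t : Int) * d2 by push_cast; ring] at h2
      exact h2
    constructor
    · intro hf
      cases f with
      | zero => rfl
      | succ g =>
        rw [aLoop, if_pos hb, if_neg (by simp [hc])]
        simp only [hc, hmv]
        rw [if_neg (by simp), if_neg (by simp)]
        exact (ih g (i + d1) (j + d2) tot _ mirrors hshift).1 (by omega)
    · intro hf
      cases f with
      | zero => omega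
      | succ g =>
        rw [aLoop, if_pos hb, if_neg (by simp [hc])]
        simp only [hc, hmv]
        rw [if_neg (by simp), if_neg (by simp)]
        obtain ⟨visited', hs1, hs2, heq⟩ := (ih g (i + d1) (j + d2) tot
          (PySem.Set.add visited (i, j, dir)) mirrors hshift).2 (by omega)
        refine ⟨visited', ?_, ?_, ?_⟩
        · intro e he
          exact hs1 e ((PySem.Set.mem_add _ _ _).mpr (Or.inl he))
        · intro e he
          rcases hs2 e he with h | h
          · rcases (PySem.Set.mem_add _ _ _).mp h with h' | h'
            · exact Or.inl h'
            · subst h'; exact Or.inr hc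
          · exact Or.inr h
        · rw [heq]
          rw [show i + d1 + (k : Int) * d1 = i + ((k + 1 : Nat) : Int) * d1 by push_cast; ring,
              show j + d2 + (k : Int) * d2 = j + ((k + 1 : Nat) : Int) * d2 by push_cast; ring,
              show g - k = (g + 1) - (k + 1) by omega]

theorem len_add {α : Type} [BEq α] [LawfulBEq α] (s : PySem.Set α) (x : α) :
    PySem.Set.len (PySem.Set.add s x) = if x ∈ s then PySem.Set.len s else PySem.Set.len s + 1 := by
  by_cases h : x ∈ s
  · rw [PySem.Set.add_of_mem h, if_pos h]
  · rw [PySem.Set.add_of_not_mem h, if_neg h]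
    simp [PySem.Set.len]

set_option maxHeartbeats 1600000 in
theorem sim (mx : List (List String)) (n m total : Int) (hn : 0 < n) (hm : 0 < m) :
    ∀ (d f : Nat), f ≤ d → ∀ (i j : Int) (dir : String)
      (visited seen : PySem.Set (Int × Int × String)) (hit : PySem.Set (Int × Int)),
      (dir = "N" ∨ dir = "S" ∨ dir = "E" ∨ dir = "W") →
      ((dir = "N" → 0 ≤ i ∧ i ≤ n ∧ 0 ≤ j ∧ j < m) ∧
       (dir = "S" → -1 ≤ i ∧ i < n ∧ 0 ≤ j ∧ j < m) ∧
       (dir = "W" → 0 ≤ i ∧ i < n ∧ 0 ≤ j ∧ j ≤ m) ∧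
       (dir = "E" → 0 ≤ i ∧ i < n ∧ -1 ≤ j ∧ j < m)) →
      (∀ e ∈ seen, e ∈ visited) →
      (∀ e ∈ visited, pvCell mx e.1 e.2.1 ≠ "." → e ∈ seen) →
      aLoop mx n m f i j dir (total - PySem.Set.len hit) visited hit
        = bLoop mx n m total d f i j dir seen hit := by
  intro d
  induction d with
  | zero =>
    intro f hf i j dir visited seen hit _ _ _ _
    have : f = 0 := by omega
    subst this
    rw [aLoop, bLoop]
    simp only [decide_eq_decide]
    omega
  | succ d ihd =>
    intro f hf i j dir visited seen hit hdir hray hsv hvs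
    cases f with
    | zero =>
      rw [aLoop, bLoop]
      simp only [decide_eq_decide]
      omega
    | succ g =>
      rcases hdir with hD | hD | hD | hD
      -- ================= case "N" =================
      · subst hD
        obtain ⟨hi0, hin, hj0, hjm⟩ := hray.1 rfl
        have hmvN : ∀ a b : Int, aMove "." "N" a b = (a + 1, b + 0, "N") := by
          intro a b; simp [aMove]; try omega
        have hlook := look_N mx n m i j (by omega) hi0 hin hj0 hjm
        rw [bLoop, hlook]
        cases hfi : firstIdx (fun t => pvCell mx t j) n i with
        | none =>
          have hA := aLoop_exit mx n m "N" 1 0 hmvN (g+1) i j (total - PySem.Set.len hit) visited hit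
            (by
              intro t ht
              simp only [mul_one, mul_zero, add_zero] at ht ⊢
              exact firstIdx_none _ n t i hfi (by omega))
          rw [hA]
          simp only [decide_eq_decide]
          omega
        | some v =>
          obtain ⟨hiv, hvn, hcv, hdotsb⟩ :=
            firstIdx_some (fun t => pvCell mx t j) n (n - i).toNat i v (le_refl _) hfi
          set K : Nat := (v - i).toNat with hKdef
          have hKv : (K : Int) = v - i := by omega
          have hdots : ∀ t : Nat, t < K →
              ((0 ≤ i + t * 1 ∧ i + t * 1 < n) ∧ (0 ≤ j + t * 0 ∧ j + t * 0 < m)) ∧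
              pvCell mx (i + t * 1) (j + t * 0) = "." := by
            intro t ht
            have htK : (t : Int) < (K : Int) := by exact_mod_cast ht
            simp only [mul_one, mul_zero, add_zero]
            exact ⟨⟨⟨by omega, by omega⟩, hj0, hjm⟩, hdotsb (i + t) (by omega) (by omega)⟩
          simp only [String.reduceEq, or_false, if_true, sub_self, Int.natAbs_zero, add_zero]
          rw [show (v - i).natAbs = K by omega]
          by_cases hk : K ≤ g
          · rw [if_pos hk]
            obtain ⟨visited', hs1, hs2, heq⟩ :=
              (aLoop_run mx n m "N" 1 0 hmvN K (g+1) i j (total - PySem.Set.len hit)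
                visited hit hdots).2 (by omega)
            rw [heq, show i + (K : Int) * 1 = v by omega, show j + (K : Int) * 0 = j by omega,
                show g + 1 - K = (g - K) + 1 by omega]
            rw [aLoop, if_pos (⟨⟨by omega, hvn⟩, hj0, hjm⟩ :
              (0 ≤ v ∧ v < n) ∧ (0 ≤ j ∧ j < m))]
            by_cases hs : (v, j, "N") ∈ seen
            · rw [if_pos ⟨hs1 _ (hsv _ hs), hcv⟩, if_pos hs]
              simp only [decide_eq_decide]
              omega
            · have hnv : ((v, j, "N") : Int × Int × String) ∉ visited' := by
                intro hmem
                rcases hs2 _ hmem with h | h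
                · exact hs (hvs _ h hcv)
                · exact hcv h
              rw [if_neg (fun hh => hnv hh.1), if_neg hs]
              have htot : (if pvCell mx v j ≠ "." ∧ (v, j) ∉ hit
                    then total - PySem.Set.len hit - 1 else total - PySem.Set.len hit)
                  = total - PySem.Set.len (PySem.Set.add hit (v, j)) := by
                rw [len_add]
                by_cases hpos : ((v, j) : Int × Int) ∈ hit
                · rw [if_neg (fun hh => hh.2 hpos), if_pos hpos]
                · rw [if_pos ⟨hcv, hpos⟩, if_neg hpos]; ring
              have hsv' : ∀ e ∈ PySem.Set.add seen (v, j, "N"),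
                  e ∈ PySem.Set.add visited' (v, j, "N") := by
                intro e he
                rcases (PySem.Set.mem_add _ _ _).mp he with h | h
                · exact (PySem.Set.mem_add _ _ _).mpr (Or.inl (hs1 _ (hsv _ h)))
                · exact (PySem.Set.mem_add _ _ _).mpr (Or.inr h)
              have hvs' : ∀ e ∈ PySem.Set.add visited' (v, j, "N"),
                  pvCell mx e.1 e.2.1 ≠ "." → e ∈ PySem.Set.add seen (v, j, "N") := by
                intro e he hne
                rcases (PySem.Set.mem_add _ _ _).mp he with h | h
                · rcases hs2 _ h with h' | h'
                  · exact (PySem.Set.mem_add _ _ _).mpr (Or.inl (hvs _ h' hne))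
                  · exact absurd h' hne
                · exact (PySem.Set.mem_add _ _ _).mpr (Or.inr h)
              by_cases hsl : pvCell mx v j = "/"
              · have hmv : aMove (pvCell mx v j) "N" v j = (v, j - 1, "E") := by
                  rw [hsl]; simp [aMove]
                have hrefl : bRefl (pvCell mx v j) "N" = some "E" := by
                  rw [hsl]; simp [bRefl]
                rw [hrefl]
                simp only [hmv, if_pos hcv, htot, String.reduceEq, reduceIte]
                exact ihd (g - K) (by omega) v (j - 1) "E"
                  (PySem.Set.add visited' (v, j, "N")) (PySem.Set.add seen (v, j, "N"))
                  (PySem.Set.add hit (v, j)) (Or.inr (Or.inr (Or.inl rfl)))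
                  ⟨by simp, by simp, by simp, fun _ => ⟨by omega, hvn, by omega, by omega⟩⟩
                  hsv' hvs'
              · by_cases hbk : pvCell mx v j = "\\"
                · have hmv : aMove (pvCell mx v j) "N" v j = (v, j + 1, "W") := by
                    rw [hbk]; simp [aMove]
                  have hrefl : bRefl (pvCell mx v j) "N" = some "W" := by
                    rw [hbk]; simp [bRefl]
                  rw [hrefl]
                  simp only [hmv, if_pos hcv, htot, String.reduceEq, reduceIte]
                  exact ihd (g - K) (by omega) v (j + 1) "W"
                    (PySem.Set.add visited' (v, j, "N")) (PySem.Set.add seen (v, j, "N"))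
                    (PySem.Set.add hit (v, j)) (Or.inr (Or.inr (Or.inr rfl)))
                    ⟨by simp, by simp, fun _ => ⟨by omega, hvn, by omega, by omega⟩, by simp⟩
                    hsv' hvs'
                · have hmv : aMove (pvCell mx v j) "N" v j = (v, j, "N") := by
                    simp [aMove, hsl, hbk, hcv]
                  have hrefl : bRefl (pvCell mx v j) "N" = none := by
                    simp [bRefl, hsl, hbk]
                  rw [hrefl]
                  simp only [hmv, if_pos hcv, htot]
                  rw [aLoop_break mx n m (g - K) v j "N" _
                    (PySem.Set.add visited' (v, j, "N")) (PySem.Set.add hit (v, j))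
                    ((PySem.Set.mem_add _ _ _).mpr (Or.inr rfl)) hcv]
                  simp only [decide_eq_decide]
                  omega
          · rw [if_neg hk]
            rw [(aLoop_run mx n m "N" 1 0 hmvN K (g+1) i j (total - PySem.Set.len hit)
              visited hit hdots).1 (by omega)]
            simp only [decide_eq_decide]
            omega
      -- ================= case "S" =================
      · subst hD
        obtain ⟨hi0, hin, hj0, hjm⟩ := hray.2.1 rfl
        have hmvS : ∀ a b : Int, aMove "." "S" a b = (a + (-1), b + 0, "S") := by
          intro a b; simp [aMove]; try omega
        have hlook := look_S mx n m i j (by omega) hi0 hin hj0 hjm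
        rw [bLoop, hlook]
        cases hfi : lastIdx (fun t => pvCell mx t j) i with
        | none =>
          have hA := aLoop_exit mx n m "S" (-1) 0 hmvS (g+1) i j (total - PySem.Set.len hit) visited hit
            (by
              intro t ht
              rw [show i + (t : Int) * (-1) = i - (t : Int) by ring,
                  show j + (t : Int) * 0 = j by ring] at ht ⊢
              exact lastIdx_none _ t i hfi (by omega))
          rw [hA]
          simp only [decide_eq_decide]
          omega
        | some v =>
          obtain ⟨hv0, hvi, hcv, hdotsb⟩ :=
            lastIdx_some (fun t => pvCell mx t j) (i + 1).toNat i v (le_refl _) hfi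
          set K : Nat := (i - v).toNat with hKdef
          have hKv : (K : Int) = i - v := by omega
          have hdots : ∀ t : Nat, t < K →
              ((0 ≤ i + t * (-1) ∧ i + t * (-1) < n) ∧ (0 ≤ j + t * 0 ∧ j + t * 0 < m)) ∧
              pvCell mx (i + t * (-1)) (j + t * 0) = "." := by
            intro t ht
            have htK : (t : Int) < (K : Int) := by exact_mod_cast ht
            rw [show i + (t : Int) * (-1) = i - (t : Int) by ring,
                show j + (t : Int) * 0 = j by ring]
            exact ⟨⟨⟨by omega, by omega⟩, hj0, hjm⟩, hdotsb (i - t) (by omega) (by omega)⟩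
          simp only [String.reduceEq, or_true, if_true, sub_self, Int.natAbs_zero, add_zero]
          rw [show (v - i).natAbs = K by omega]
          by_cases hk : K ≤ g
          · rw [if_pos hk]
            obtain ⟨visited', hs1, hs2, heq⟩ :=
              (aLoop_run mx n m "S" (-1) 0 hmvS K (g+1) i j (total - PySem.Set.len hit)
                visited hit hdots).2 (by omega)
            rw [heq, show i + (K : Int) * (-1) = v by omega, show j + (K : Int) * 0 = j by omega,
                show g + 1 - K = (g - K) + 1 by omega]
            rw [aLoop, if_pos (⟨⟨hv0, by omega⟩, hj0, hjm⟩ :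
              (0 ≤ v ∧ v < n) ∧ (0 ≤ j ∧ j < m))]
            by_cases hs : (v, j, "S") ∈ seen
            · rw [if_pos ⟨hs1 _ (hsv _ hs), hcv⟩, if_pos hs]
              simp only [decide_eq_decide]
              omega
            · have hnv : ((v, j, "S") : Int × Int × String) ∉ visited' := by
                intro hmem
                rcases hs2 _ hmem with h | h
                · exact hs (hvs _ h hcv)
                · exact hcv h
              rw [if_neg (fun hh => hnv hh.1), if_neg hs]
              have htot : (if pvCell mx v j ≠ "." ∧ (v, j) ∉ hit
                    then total - PySem.Set.len hit - 1 else total - PySem.Set.len hit)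
                  = total - PySem.Set.len (PySem.Set.add hit (v, j)) := by
                rw [len_add]
                by_cases hpos : ((v, j) : Int × Int) ∈ hit
                · rw [if_neg (fun hh => hh.2 hpos), if_pos hpos]
                · rw [if_pos ⟨hcv, hpos⟩, if_neg hpos]; ring
              have hsv' : ∀ e ∈ PySem.Set.add seen (v, j, "S"),
                  e ∈ PySem.Set.add visited' (v, j, "S") := by
                intro e he
                rcases (PySem.Set.mem_add _ _ _).mp he with h | h
                · exact (PySem.Set.mem_add _ _ _).mpr (Or.inl (hs1 _ (hsv _ h)))
                · exact (PySem.Set.mem_add _ _ _).mpr (Or.inr h)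
              have hvs' : ∀ e ∈ PySem.Set.add visited' (v, j, "S"),
                  pvCell mx e.1 e.2.1 ≠ "." → e ∈ PySem.Set.add seen (v, j, "S") := by
                intro e he hne
                rcases (PySem.Set.mem_add _ _ _).mp he with h | h
                · rcases hs2 _ h with h' | h'
                  · exact (PySem.Set.mem_add _ _ _).mpr (Or.inl (hvs _ h' hne))
                  · exact absurd h' hne
                · exact (PySem.Set.mem_add _ _ _).mpr (Or.inr h)
              by_cases hsl : pvCell mx v j = "/"
              · have hmv : aMove (pvCell mx v j) "S" v j = (v, j + 1, "W") := by
                  rw [hsl]; simp [aMove]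
                have hrefl : bRefl (pvCell mx v j) "S" = some "W" := by
                  rw [hsl]; simp [bRefl]
                rw [hrefl]
                simp only [hmv, if_pos hcv, htot, String.reduceEq, reduceIte]
                exact ihd (g - K) (by omega) v (j + 1) "W"
                  (PySem.Set.add visited' (v, j, "S")) (PySem.Set.add seen (v, j, "S"))
                  (PySem.Set.add hit (v, j)) (Or.inr (Or.inr (Or.inr rfl)))
                  ⟨by simp, by simp, fun _ => ⟨hv0, by omega, by omega, by omega⟩, by simp⟩
                  hsv' hvs'
              · by_cases hbk : pvCell mx v j = "\\"
                · have hmv : aMove (pvCell mx v j) "S" v j = (v, j - 1, "E") := by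
                    rw [hbk]; simp [aMove]
                  have hrefl : bRefl (pvCell mx v j) "S" = some "E" := by
                    rw [hbk]; simp [bRefl]
                  rw [hrefl]
                  simp only [hmv, if_pos hcv, htot, String.reduceEq, reduceIte]
                  exact ihd (g - K) (by omega) v (j - 1) "E"
                    (PySem.Set.add visited' (v, j, "S")) (PySem.Set.add seen (v, j, "S"))
                    (PySem.Set.add hit (v, j)) (Or.inr (Or.inr (Or.inl rfl)))
                    ⟨by simp, by simp, by simp, fun _ => ⟨hv0, by omega, by omega, by omega⟩⟩
                    hsv' hvs'
                · have hmv : aMove (pvCell mx v j) "S" v j = (v, j, "S") := by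
                    simp [aMove, hsl, hbk, hcv]
                  have hrefl : bRefl (pvCell mx v j) "S" = none := by
                    simp [bRefl, hsl, hbk]
                  rw [hrefl]
                  simp only [hmv, if_pos hcv, htot]
                  rw [aLoop_break mx n m (g - K) v j "S" _
                    (PySem.Set.add visited' (v, j, "S")) (PySem.Set.add hit (v, j))
                    ((PySem.Set.mem_add _ _ _).mpr (Or.inr rfl)) hcv]
                  simp only [decide_eq_decide]
                  omega
          · rw [if_neg hk]
            rw [(aLoop_run mx n m "S" (-1) 0 hmvS K (g+1) i j (total - PySem.Set.len hit)
              visited hit hdots).1 (by omega)]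
            simp only [decide_eq_decide]
            omega
      -- ================= case "E" =================
      · subst hD
        obtain ⟨hi0, hin, hj0, hjm⟩ := hray.2.2.2 rfl
        have hmvE : ∀ a b : Int, aMove "." "E" a b = (a + 0, b + (-1), "E") := by
          intro a b; simp [aMove]; try omega
        have hlook := look_E mx n m i j (by omega) hi0 hin hj0 hjm
        rw [bLoop, hlook]
        cases hfi : lastIdx (fun t => pvCell mx i t) j with
        | none =>
          have hA := aLoop_exit mx n m "E" 0 (-1) hmvE (g+1) i j (total - PySem.Set.len hit) visited hit
            (by
              intro t ht
              rw [show i + (t : Int) * 0 = i by ring,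
                  show j + (t : Int) * (-1) = j - (t : Int) by ring] at ht ⊢
              exact lastIdx_none _ t j hfi (by omega))
          rw [hA]
          simp only [decide_eq_decide]
          omega
        | some v =>
          obtain ⟨hv0, hvj, hcv, hdotsb⟩ :=
            lastIdx_some (fun t => pvCell mx i t) (j + 1).toNat j v (le_refl _) hfi
          set K : Nat := (j - v).toNat with hKdef
          have hKv : (K : Int) = j - v := by omega
          have hdots : ∀ t : Nat, t < K →
              ((0 ≤ i + t * 0 ∧ i + t * 0 < n) ∧ (0 ≤ j + t * (-1) ∧ j + t * (-1) < m)) ∧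
              pvCell mx (i + t * 0) (j + t * (-1)) = "." := by
            intro t ht
            have htK : (t : Int) < (K : Int) := by exact_mod_cast ht
            rw [show i + (t : Int) * 0 = i by ring,
                show j + (t : Int) * (-1) = j - (t : Int) by ring]
            exact ⟨⟨⟨hi0, hin⟩, by omega, by omega⟩, hdotsb (j - t) (by omega) (by omega)⟩
          simp only [String.reduceEq, or_self, if_false, sub_self, Int.natAbs_zero, zero_add]
          rw [show (v - j).natAbs = K by omega]
          by_cases hk : K ≤ g
          · rw [if_pos hk]
            obtain ⟨visited', hs1, hs2, heq⟩ :=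
              (aLoop_run mx n m "E" 0 (-1) hmvE K (g+1) i j (total - PySem.Set.len hit)
                visited hit hdots).2 (by omega)
            rw [heq, show i + (K : Int) * 0 = i by omega, show j + (K : Int) * (-1) = v by omega,
                show g + 1 - K = (g - K) + 1 by omega]
            rw [aLoop, if_pos (⟨⟨hi0, hin⟩, hv0, by omega⟩ :
              (0 ≤ i ∧ i < n) ∧ (0 ≤ v ∧ v < m))]
            by_cases hs : (i, v, "E") ∈ seen
            · rw [if_pos ⟨hs1 _ (hsv _ hs), hcv⟩, if_pos hs]
              simp only [decide_eq_decide]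
              omega
            · have hnv : ((i, v, "E") : Int × Int × String) ∉ visited' := by
                intro hmem
                rcases hs2 _ hmem with h | h
                · exact hs (hvs _ h hcv)
                · exact hcv h
              rw [if_neg (fun hh => hnv hh.1), if_neg hs]
              have htot : (if pvCell mx i v ≠ "." ∧ (i, v) ∉ hit
                    then total - PySem.Set.len hit - 1 else total - PySem.Set.len hit)
                  = total - PySem.Set.len (PySem.Set.add hit (i, v)) := by
                rw [len_add]
                by_cases hpos : ((i, v) : Int × Int) ∈ hit
                · rw [if_neg (fun hh => hh.2 hpos), if_pos hpos]
                · rw [if_pos ⟨hcv, hpos⟩, if_neg hpos]; ring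
              have hsv' : ∀ e ∈ PySem.Set.add seen (i, v, "E"),
                  e ∈ PySem.Set.add visited' (i, v, "E") := by
                intro e he
                rcases (PySem.Set.mem_add _ _ _).mp he with h | h
                · exact (PySem.Set.mem_add _ _ _).mpr (Or.inl (hs1 _ (hsv _ h)))
                · exact (PySem.Set.mem_add _ _ _).mpr (Or.inr h)
              have hvs' : ∀ e ∈ PySem.Set.add visited' (i, v, "E"),
                  pvCell mx e.1 e.2.1 ≠ "." → e ∈ PySem.Set.add seen (i, v, "E") := by
                intro e he hne
                rcases (PySem.Set.mem_add _ _ _).mp he with h | h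
                · rcases hs2 _ h with h' | h'
                  · exact (PySem.Set.mem_add _ _ _).mpr (Or.inl (hvs _ h' hne))
                  · exact absurd h' hne
                · exact (PySem.Set.mem_add _ _ _).mpr (Or.inr h)
              by_cases hsl : pvCell mx i v = "/"
              · have hmv : aMove (pvCell mx i v) "E" i v = (i + 1, v, "N") := by
                  rw [hsl]; simp [aMove]
                have hrefl : bRefl (pvCell mx i v) "E" = some "N" := by
                  rw [hsl]; simp [bRefl]
                rw [hrefl]
                simp only [hmv, if_pos hcv, htot, String.reduceEq, reduceIte]
                exact ihd (g - K) (by omega) (i + 1) v "N"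
                  (PySem.Set.add visited' (i, v, "E")) (PySem.Set.add seen (i, v, "E"))
                  (PySem.Set.add hit (i, v)) (Or.inl rfl)
                  ⟨fun _ => ⟨by omega, by omega, hv0, by omega⟩, by simp, by simp, by simp⟩
                  hsv' hvs'
              · by_cases hbk : pvCell mx i v = "\\"
                · have hmv : aMove (pvCell mx i v) "E" i v = (i - 1, v, "S") := by
                    rw [hbk]; simp [aMove]
                  have hrefl : bRefl (pvCell mx i v) "E" = some "S" := by
                    rw [hbk]; simp [bRefl]
                  rw [hrefl]
                  simp only [hmv, if_pos hcv, htot, String.reduceEq, reduceIte]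
                  exact ihd (g - K) (by omega) (i - 1) v "S"
                    (PySem.Set.add visited' (i, v, "E")) (PySem.Set.add seen (i, v, "E"))
                    (PySem.Set.add hit (i, v)) (Or.inr (Or.inl rfl))
                    ⟨by simp, fun _ => ⟨by omega, by omega, hv0, by omega⟩, by simp, by simp⟩
                    hsv' hvs'
                · have hmv : aMove (pvCell mx i v) "E" i v = (i, v, "E") := by
                    simp [aMove, hsl, hbk, hcv]
                  have hrefl : bRefl (pvCell mx i v) "E" = none := by
                    simp [bRefl, hsl, hbk]
                  rw [hrefl]
                  simp only [hmv, if_pos hcv, htot]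
                  rw [aLoop_break mx n m (g - K) i v "E" _
                    (PySem.Set.add visited' (i, v, "E")) (PySem.Set.add hit (i, v))
                    ((PySem.Set.mem_add _ _ _).mpr (Or.inr rfl)) hcv]
                  simp only [decide_eq_decide]
                  omega
          · rw [if_neg hk]
            rw [(aLoop_run mx n m "E" 0 (-1) hmvE K (g+1) i j (total - PySem.Set.len hit)
              visited hit hdots).1 (by omega)]
            simp only [decide_eq_decide]
            omega
      -- ================= case "W" =================
      · subst hD
        obtain ⟨hi0, hin, hj0, hjm⟩ := hray.2.2.1 rfl
        have hmvW : ∀ a b : Int, aMove "." "W" a b = (a + 0, b + 1, "W") := by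
          intro a b; simp [aMove]; try omega
        have hlook := look_W mx n m i j (by omega) hi0 hin hj0 hjm
        rw [bLoop, hlook]
        cases hfi : firstIdx (fun t => pvCell mx i t) m j with
        | none =>
          have hA := aLoop_exit mx n m "W" 0 1 hmvW (g+1) i j (total - PySem.Set.len hit) visited hit
            (by
              intro t ht
              rw [show i + (t : Int) * 0 = i by ring,
                  show j + (t : Int) * 1 = j + (t : Int) by ring] at ht ⊢
              exact firstIdx_none _ m t j hfi (by omega))
          rw [hA]
          simp only [decide_eq_decide]
          omega
        | some v =>
          obtain ⟨hjv, hvm, hcv, hdotsb⟩ :=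
            firstIdx_some (fun t => pvCell mx i t) m (m - j).toNat j v (le_refl _) hfi
          set K : Nat := (v - j).toNat with hKdef
          have hKv : (K : Int) = v - j := by omega
          have hdots : ∀ t : Nat, t < K →
              ((0 ≤ i + t * 0 ∧ i + t * 0 < n) ∧ (0 ≤ j + t * 1 ∧ j + t * 1 < m)) ∧
              pvCell mx (i + t * 0) (j + t * 1) = "." := by
            intro t ht
            have htK : (t : Int) < (K : Int) := by exact_mod_cast ht
            rw [show i + (t : Int) * 0 = i by ring,
                show j + (t : Int) * 1 = j + (t : Int) by ring]
            exact ⟨⟨⟨hi0, hin⟩, by omega, by omega⟩, hdotsb (j + t) (by omega) (by omega)⟩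
          simp only [String.reduceEq, or_self, if_false, sub_self, Int.natAbs_zero, zero_add]
          rw [show (v - j).natAbs = K by omega]
          by_cases hk : K ≤ g
          · rw [if_pos hk]
            obtain ⟨visited', hs1, hs2, heq⟩ :=
              (aLoop_run mx n m "W" 0 1 hmvW K (g+1) i j (total - PySem.Set.len hit)
                visited hit hdots).2 (by omega)
            rw [heq, show i + (K : Int) * 0 = i by omega, show j + (K : Int) * 1 = v by omega,
                show g + 1 - K = (g - K) + 1 by omega]
            rw [aLoop, if_pos (⟨⟨hi0, hin⟩, by omega, hvm⟩ :
              (0 ≤ i ∧ i < n) ∧ (0 ≤ v ∧ v < m))]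
            by_cases hs : (i, v, "W") ∈ seen
            · rw [if_pos ⟨hs1 _ (hsv _ hs), hcv⟩, if_pos hs]
              simp only [decide_eq_decide]
              omega
            · have hnv : ((i, v, "W") : Int × Int × String) ∉ visited' := by
                intro hmem
                rcases hs2 _ hmem with h | h
                · exact hs (hvs _ h hcv)
                · exact hcv h
              rw [if_neg (fun hh => hnv hh.1), if_neg hs]
              have htot : (if pvCell mx i v ≠ "." ∧ (i, v) ∉ hit
                    then total - PySem.Set.len hit - 1 else total - PySem.Set.len hit)
                  = total - PySem.Set.len (PySem.Set.add hit (i, v)) := by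
                rw [len_add]
                by_cases hpos : ((i, v) : Int × Int) ∈ hit
                · rw [if_neg (fun hh => hh.2 hpos), if_pos hpos]
                · rw [if_pos ⟨hcv, hpos⟩, if_neg hpos]; ring
              have hsv' : ∀ e ∈ PySem.Set.add seen (i, v, "W"),
                  e ∈ PySem.Set.add visited' (i, v, "W") := by
                intro e he
                rcases (PySem.Set.mem_add _ _ _).mp he with h | h
                · exact (PySem.Set.mem_add _ _ _).mpr (Or.inl (hs1 _ (hsv _ h)))
                · exact (PySem.Set.mem_add _ _ _).mpr (Or.inr h)
              have hvs' : ∀ e ∈ PySem.Set.add visited' (i, v, "W"),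
                  pvCell mx e.1 e.2.1 ≠ "." → e ∈ PySem.Set.add seen (i, v, "W") := by
                intro e he hne
                rcases (PySem.Set.mem_add _ _ _).mp he with h | h
                · rcases hs2 _ h with h' | h'
                  · exact (PySem.Set.mem_add _ _ _).mpr (Or.inl (hvs _ h' hne))
                  · exact absurd h' hne
                · exact (PySem.Set.mem_add _ _ _).mpr (Or.inr h)
              by_cases hsl : pvCell mx i v = "/"
              · have hmv : aMove (pvCell mx i v) "W" i v = (i - 1, v, "S") := by
                  rw [hsl]; simp [aMove]
                have hrefl : bRefl (pvCell mx i v) "W" = some "S" := by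
                  rw [hsl]; simp [bRefl]
                rw [hrefl]
                simp only [hmv, if_pos hcv, htot, String.reduceEq, reduceIte]
                exact ihd (g - K) (by omega) (i - 1) v "S"
                  (PySem.Set.add visited' (i, v, "W")) (PySem.Set.add seen (i, v, "W"))
                  (PySem.Set.add hit (i, v)) (Or.inr (Or.inl rfl))
                  ⟨by simp, fun _ => ⟨by omega, by omega, by omega, hvm⟩, by simp, by simp⟩
                  hsv' hvs'
              · by_cases hbk : pvCell mx i v = "\\"
                · have hmv : aMove (pvCell mx i v) "W" i v = (i + 1, v, "N") := by
                    rw [hbk]; simp [aMove]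
                  have hrefl : bRefl (pvCell mx i v) "W" = some "N" := by
                    rw [hbk]; simp [bRefl]
                  rw [hrefl]
                  simp only [hmv, if_pos hcv, htot, String.reduceEq, reduceIte]
                  exact ihd (g - K) (by omega) (i + 1) v "N"
                    (PySem.Set.add visited' (i, v, "W")) (PySem.Set.add seen (i, v, "W"))
                    (PySem.Set.add hit (i, v)) (Or.inl rfl)
                    ⟨fun _ => ⟨by omega, by omega, by omega, hvm⟩, by simp, by simp, by simp⟩
                    hsv' hvs'
                · have hmv : aMove (pvCell mx i v) "W" i v = (i, v, "W") := by
                    simp [aMove, hsl, hbk, hcv]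
                  have hrefl : bRefl (pvCell mx i v) "W" = none := by
                    simp [bRefl, hsl, hbk]
                  rw [hrefl]
                  simp only [hmv, if_pos hcv, htot]
                  rw [aLoop_break mx n m (g - K) i v "W" _
                    (PySem.Set.add visited' (i, v, "W")) (PySem.Set.add hit (i, v))
                    ((PySem.Set.mem_add _ _ _).mpr (Or.inr rfl)) hcv]
                  simp only [decide_eq_decide]
                  omega
          · rw [if_neg hk]
            rw [(aLoop_run mx n m "W" 0 1 hmvW K (g+1) i j (total - PySem.Set.len hit)
              visited hit hdots).1 (by omega)]
            simp only [decide_eq_decide]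
            omega


-- ===== VERDICT (by name: the statement is the Claim_ definition above) =====
theorem can_visited_all_spec : Claim_equal_can_visited_all := by
  intro i j n m dir total mx _hDom hPre
  unfold Spec_can_visited_all can_visited_all can_visited_all_alt
  by_cases hb : (0 ≤ i ∧ i < n) ∧ (0 ≤ j ∧ j < m)
  · rw [if_pos hb]
    have hdir := (hPre hb).1
    have h := sim mx n m total (by omega) (by omega)
      (8 * n.toNat * m.toNat + 2) (8 * n.toNat * m.toNat + 2) (le_refl _) i j dir
      PySem.Set.empty PySem.Set.empty PySem.Set.empty hdir
      (by
        rcases hdir with h | h | h | h <;> subst h <;>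
          exact ⟨fun _ => ⟨by omega, by omega, by omega, by omega⟩,
                 fun _ => ⟨by omega, by omega, by omega, by omega⟩,
                 fun _ => ⟨by omega, by omega, by omega, by omega⟩,
                 fun _ => ⟨by omega, by omega, by omega, by omega⟩⟩)
      (fun e he => he)
      (fun e he => absurd he (by simp [PySem.Set.empty]))
    rw [show total - PySem.Set.len PySem.Set.empty = total by simp [PySem.Set.len, PySem.Set.empty]] at h
    exact h
  · rw [if_neg hb, aLoop_oob mx n m _ i j dir total _ _ hb]
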